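-- pv_equiv track=rewrite | github.com/Riken-Shah/local-sync-go | scripts/api.py | extract_keywords_without_quotes
-- ===== SOURCE A (Python) =====
-- def extract_keywords_without_quotes(input_string):
--     keywords = []
--
--     start_index = 0
--     result_string = input_string
--
--     while True:
--         # Find the next occurrence of double quotes
--         start_quote = input_string.find('"', start_index)
--
--         if start_quote == -1:
--             break
--
--         # Find the end of the quoted string
--         end_quote = input_string.find('"', start_quote + 1)
--
--         if end_quote == -1:
--             break
--
--         # Extract the content inside double quotes
--         keywords_string = input_string[start_quote + 1:end_quote]
--
--         # Split the content by comma and remove leading/trailing whitespaces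
--         keywords.extend(keyword.strip() for keyword in keywords_string.split(','))
--
--         result_string = result_string.replace(keywords_string, "")
--
--         # Move the start_index to the next position after the current quoted string
--         start_index = end_quote + 1
--
--     return keywords, result_string.replace('"', "")
-- ===== SOURCE B (Python) =====
-- def extract_keywords_without_quotes(input_string):
--     # One-pass state-machine scanner collects the quoted contents (non-overlapping
--     # pairs, unclosed trailing quote ignored); keywords and the stripped result
--     # string are then derived from that contents list.
--     contents = []
--     cur = None  # None = outside quotes; list of chars = inside quotes
--     for ch in input_string:
--         if cur is None:
--             if ch == '"':
--                 cur = []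
--         else:
--             if ch == '"':
--                 contents.append(''.join(cur))
--                 cur = None
--             else:
--                 cur.append(ch)
--     keywords = [k.strip() for c in contents for k in c.split(',')]
--     result = input_string
--     for c in contents:
--         result = result.replace(c, '')
--     return keywords, result.replace('"', '')
-- ===== Notes on version B (the rewrite author's own statement) =====
-- stated objective: alternative
-- what changed: A repeatedly calls find on the whole string to pair quotes and interleaves keyword/replace work inside that loop; B collects the quoted contents in a single character-level state-machine scan and then derives keywords (one comprehension) and the stripped result (one replace loop) from that list.
import Mathlib
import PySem

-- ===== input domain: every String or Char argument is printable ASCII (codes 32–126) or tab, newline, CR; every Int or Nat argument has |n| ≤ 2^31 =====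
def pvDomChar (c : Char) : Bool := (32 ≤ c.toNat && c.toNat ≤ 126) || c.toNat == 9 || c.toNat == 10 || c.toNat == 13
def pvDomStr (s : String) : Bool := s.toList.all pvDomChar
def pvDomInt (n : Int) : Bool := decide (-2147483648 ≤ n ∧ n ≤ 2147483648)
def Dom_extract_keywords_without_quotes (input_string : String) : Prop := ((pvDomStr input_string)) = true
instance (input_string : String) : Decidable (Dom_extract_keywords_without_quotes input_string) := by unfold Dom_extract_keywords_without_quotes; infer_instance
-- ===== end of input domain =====

-- B replaces A's repeated find-based quote pairing (with keyword/replace work interleaved in the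
-- loop) by one character-level state-machine scan collecting the quoted contents, from which the
-- keywords and the stripped result string are derived in separate passes (objective: alternative).

-- ===== PORT A =====
-- A's `while True` loop, transliterated with a fuel guard only to make the recursion total;
-- the top-level call supplies fuel s.length + 1, which the proof shows is never exhausted.
def pvLoopA (s : List Char) : Nat → Int → List String → List Char → List String × List Char
  | 0, _, keywords, result_string => (keywords, result_string)  -- fuel guard, never reached from the top-level call
  | fuel + 1, start_index, keywords, result_string =>
    let start_quote := PySem.Chars.findFrom s ['"'] start_index none
    if start_quote = -1 then (keywords, result_string)
    else
      let end_quote := PySem.Chars.findFrom s ['"'] (start_quote + 1) none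
      if end_quote = -1 then (keywords, result_string)
      else
        let keywords_string := PySem.Chars.slice s (some (start_quote + 1)) (some end_quote)
        let keywords := keywords ++ (PySem.Chars.splitOn keywords_string [',']).map
          (fun keyword => String.ofList (PySem.Chars.strip keyword))
        let result_string := PySem.Chars.replace result_string keywords_string []
        pvLoopA s fuel (end_quote + 1) keywords result_string

def extract_keywords_without_quotes (input_string : String) : List String × String :=
  let s := input_string.toList
  let p := pvLoopA s (s.length + 1) 0 [] s
  (p.1, String.ofList (PySem.Chars.replace p.2 ['"'] []))

-- ===== PORT B =====
-- one step of B's scanner: state = (contents so far, none = outside quotes / some cur = inside)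
def pvScanStep (p : List (List Char) × Option (List Char)) (ch : Char) :
    List (List Char) × Option (List Char) :=
  match p.2 with
  | none => if ch = '"' then (p.1, some []) else p
  | some cur => if ch = '"' then (p.1 ++ [cur], none) else (p.1, some (cur ++ [ch]))

def extract_keywords_without_quotes_alt (input_string : String) : List String × String :=
  let s := input_string.toList
  let contents := (s.foldl pvScanStep ([], none)).1
  let keywords := contents.flatMap (fun c => (PySem.Chars.splitOn c [',']).map
    (fun k => String.ofList (PySem.Chars.strip k)))
  let result := contents.foldl (fun r c => PySem.Chars.replace r c []) s
  (keywords, String.ofList (PySem.Chars.replace result ['"'] []))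

-- ===== PRECONDITION & SPEC =====
def Spec_extract_keywords_without_quotes (input_string : String) (out : List String × String) : Prop := out = extract_keywords_without_quotes_alt input_string
instance (input_string : String) (out : List String × String) : Decidable (Spec_extract_keywords_without_quotes input_string out) := by unfold Spec_extract_keywords_without_quotes; infer_instance

-- ===== CLAIM (what is proved, stated in full; the proofs are below) =====
def Claim_equal_extract_keywords_without_quotes : Prop := ∀ (input_string : String), Dom_extract_keywords_without_quotes input_string → Spec_extract_keywords_without_quotes input_string (extract_keywords_without_quotes input_string)

-- ===== LEMMAS AND PROOFS =====

-- the list of quoted contents B's scanner collects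
def pvContents (l : List Char) : List (List Char) := (l.foldl pvScanStep ([], none)).1

-- the keywords contributed by one quoted content
def pvKw (c : List Char) : List String :=
  (PySem.Chars.splitOn c [',']).map (fun k => String.ofList (PySem.Chars.strip k))

theorem pvScan_none_qf (pre : List Char) (hpre : ∀ c ∈ pre, c ≠ '"') :
    ∀ (acc : List (List Char)) (rest : List Char),
      (pre ++ rest).foldl pvScanStep (acc, none) = rest.foldl pvScanStep (acc, none) := by
  induction pre with
  | nil => intro acc rest; rfl
  | cons c t ih =>
    intro acc rest
    have hc : c ≠ '"' := hpre c (by simp)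
    simp only [List.cons_append, List.foldl_cons, pvScanStep, if_neg hc]
    exact ih (fun x hx => hpre x (by simp [hx])) acc rest

theorem pvScan_some_qf (b : List Char) (hb : ∀ c ∈ b, c ≠ '"') :
    ∀ (acc : List (List Char)) (cur rest : List Char),
      (b ++ rest).foldl pvScanStep (acc, some cur) = rest.foldl pvScanStep (acc, some (cur ++ b)) := by
  induction b with
  | nil => intro acc cur rest; simp
  | cons c t ih =>
    intro acc cur rest
    have hc : c ≠ '"' := hb c (by simp)
    simp only [List.cons_append, List.foldl_cons, pvScanStep, if_neg hc]
    rw [ih (fun x hx => hb x (by simp [hx])) acc (cur ++ [c]) rest]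
    simp

theorem pvScan_acc (l : List Char) :
    ∀ (acc : List (List Char)) (st : Option (List Char)),
      (l.foldl pvScanStep (acc, st)).1 = acc ++ (l.foldl pvScanStep ([], st)).1 := by
  induction l with
  | nil => intro acc st; simp
  | cons c t ih =>
    intro acc st
    match st with
    | none =>
      by_cases hc : c = '"' <;>
        simp only [List.foldl_cons, pvScanStep, hc, if_pos, ite_false] <;>
        exact ih acc _
    | some cur =>
      by_cases hc : c = '"'
      · simp only [List.foldl_cons, pvScanStep, hc, ite_true]
        rw [ih (acc ++ [cur]) none, ih ([] ++ [cur]) none]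
        simp
      · simp only [List.foldl_cons, pvScanStep, if_neg hc]
        exact ih acc _

-- find of a single quote in a string decomposed as quote-free prefix ++ '"' :: rest
theorem pvFind_quote (pre r : List Char) (hpre : ∀ c ∈ pre, c ≠ '"') :
    PySem.Chars.find (pre ++ '"' :: r) ['"'] = (pre.length : Int) := by
  set m := pre ++ '"' :: r with hm
  have hinf : ['"'] <:+: m := ⟨pre, r, by simp [hm]⟩
  have hnn : 0 ≤ PySem.Chars.find m ['"'] := (PySem.Chars.find_nonneg_iff m ['"']).mpr hinf
  obtain ⟨hpref, hmin⟩ := PySem.Chars.find_spec (s := m) (sub := ['"']) hnn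
  set i := (PySem.Chars.find m ['"']).toNat with hi
  have hieq : i = pre.length := by
    rcases lt_trichotomy i pre.length with h | h | h
    · exfalso
      obtain ⟨t, ht⟩ := hpref
      have hdrop : m.drop i = pre.drop i ++ '"' :: r := by
        simp [hm, List.drop_append_of_le_length (Nat.le_of_lt h)]
      have hne : pre.drop i ≠ [] := by
        intro hnil
        have := List.drop_eq_nil_iff.mp hnil
        omega
      obtain ⟨a, ta, ha⟩ := List.exists_cons_of_ne_nil hne
      have hamem : a ∈ pre := List.mem_of_mem_drop (by rw [ha]; simp)
      have : a = '"' := by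
        have := ht
        rw [hdrop, ha] at this
        simpa using congrArg (·.head?) this.symm
      exact hpre a hamem this
    · exact h
    · exfalso
      apply hmin pre.length h
      exact ⟨r, by simp [hm]⟩
  rw [← Int.toNat_of_nonneg hnn, ← hi, hieq]

theorem pvFind_no_quote (m : List Char) (hm : ∀ c ∈ m, c ≠ '"') :
    PySem.Chars.find m ['"'] = -1 := by
  apply (PySem.Chars.find_eq_neg_one_iff m ['"']).mpr
  intro hinf
  exact hm '"' (hinf.subset (by simp)) rfl

-- facts about the takeWhile/dropWhile decomposition at the first quote
theorem pvScanStep_quote_none (acc : List (List Char)) :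
    pvScanStep (acc, none) '"' = (acc, some []) := by
  simp [pvScanStep]

theorem pvScanStep_quote_some (acc : List (List Char)) (cur : List Char) :
    pvScanStep (acc, some cur) '"' = (acc ++ [cur], none) := by
  simp [pvScanStep]

theorem pvTW_no_quote (l : List Char) :
    ∀ x ∈ l.takeWhile (· != '"'), x ≠ '"' := by
  intro x hx
  have := List.mem_takeWhile_imp hx
  simpa using this

theorem pvDW_cons (l : List Char) (c : Char) (r : List Char)
    (h : l.dropWhile (· != '"') = c :: r) : c = '"' := by
  have hne : l.dropWhile (· != '"') ≠ [] := by simp [h]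
  have h0 := List.head_dropWhile_not (· != '"') hne
  have hhead : (l.dropWhile (· != '"')).head hne = c := by simp [h]
  rw [hhead] at h0
  simpa using h0

-- MAIN LOOP LEMMA: A's loop from a natural start index computes B's scanner output on the suffix
theorem pvLoopA_eq (s : List Char) : ∀ (fuel : Nat) (k : Nat) (kw : List String) (res : List Char),
    k ≤ s.length → s.length - k < fuel →
    pvLoopA s fuel (k : Int) kw res =
      (kw ++ (pvContents (s.drop k)).flatMap pvKw,
       (pvContents (s.drop k)).foldl (fun r c => PySem.Chars.replace r c []) res) := by
  intro fuel
  induction fuel with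
  | zero => intro k kw res _ hf; omega
  | succ fuel ih =>
    intro k kw res hk hf
    set m := s.drop k with hmdef
    set pre := m.takeWhile (· != '"') with hpre_def
    set rest := m.dropWhile (· != '"') with hrest_def
    have hsplit : pre ++ rest = m := List.takeWhile_append_dropWhile
    have hpreqf : ∀ x ∈ pre, x ≠ '"' := pvTW_no_quote m
    have hfind1 : PySem.Chars.findFrom s ['"'] (k : Int) none =
        if PySem.Chars.find (s.drop k) ['"'] = -1 then -1
        else (k : Int) + PySem.Chars.find (s.drop k) ['"'] :=
      PySem.Chars.findFrom_natCast s ['"'] k hk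
    match hrest : rest with
    | [] =>
      -- no quote in the suffix: A breaks at the first find
      have hmqf : ∀ x ∈ m, x ≠ '"' := by
        intro x hx
        have : x ∈ pre := by rw [← hsplit] at hx; simpa using hx
        exact hpreqf x this
      have hfneg : PySem.Chars.find (s.drop k) ['"'] = -1 := pvFind_no_quote m hmqf
      have hC : pvContents m = [] := by
        unfold pvContents
        rw [show m = m ++ ([] : List Char) by simp, pvScan_none_qf m hmqf]
        rfl
      have hsqneg : PySem.Chars.findFrom s ['"'] (k : Int) none = -1 := by
        rw [hfind1, if_pos hfneg]
      show pvLoopA s (fuel + 1) (k : Int) kw res = _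
      rw [pvLoopA]
      simp only [hsqneg]
      rw [if_pos trivial, hC]
      simp
    | c :: r =>
      have hc : c = '"' := pvDW_cons m c r hrest_def.symm
      subst hc
      have hmeq : m = pre ++ '"' :: r := hsplit.symm
      have hfind1v : PySem.Chars.find (s.drop k) ['"'] = (pre.length : Int) := by
        rw [← hmdef, hmeq]; exact pvFind_quote pre r hpreqf
      have hlen_m : m.length = pre.length + 1 + r.length := by rw [hmeq]; simp; omega
      have hmlen : m.length = s.length - k := by rw [hmdef]; simp
      have hklen : k + pre.length + 1 ≤ s.length := by omega
      have hdropr : s.drop (k + pre.length + 1) = r := by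
        have h1 : s.drop (k + pre.length + 1) = m.drop (pre.length + 1) := by
          rw [hmdef, List.drop_drop]; ring_nf
        rw [h1, hmeq, show pre ++ '"' :: r = (pre ++ ['"']) ++ r by simp,
          List.drop_left' (by simp)]
      have hsq' : PySem.Chars.findFrom s ['"'] (k : Int) none = (k : Int) + (pre.length : Int) := by
        rw [hfind1, hfind1v, if_neg (by omega)]
      have hne1' : ¬((k : Int) + (pre.length : Int) = -1) := by omega
      set pre2 := r.takeWhile (· != '"') with hpre2_def
      set rest2 := r.dropWhile (· != '"') with hrest2_def
      have hsplit2 : pre2 ++ rest2 = r := List.takeWhile_append_dropWhile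
      have hpre2qf : ∀ x ∈ pre2, x ≠ '"' := pvTW_no_quote r
      have hfind2 : PySem.Chars.findFrom s ['"'] ((k + pre.length + 1 : Nat) : Int) none =
          if PySem.Chars.find (s.drop (k + pre.length + 1)) ['"'] = -1 then -1
          else ((k + pre.length + 1 : Nat) : Int) + PySem.Chars.find (s.drop (k + pre.length + 1)) ['"'] :=
        PySem.Chars.findFrom_natCast s ['"'] (k + pre.length + 1) hklen
      have hcast1 : (k : Int) + (pre.length : Int) + 1 = ((k + pre.length + 1 : Nat) : Int) := by
        push_cast; ring
      match hrest2 : rest2 with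
      | [] =>
        -- unclosed quote: A breaks at the second find
        have hrqf : ∀ x ∈ r, x ≠ '"' := by
          intro x hx
          have : x ∈ pre2 := by rw [← hsplit2] at hx; simpa using hx
          exact hpre2qf x this
        have hfneg : PySem.Chars.find (s.drop (k + pre.length + 1)) ['"'] = -1 := by
          rw [hdropr]; exact pvFind_no_quote r hrqf
        have hC : pvContents m = [] := by
          unfold pvContents
          rw [hmeq, pvScan_none_qf pre hpreqf, List.foldl_cons, pvScanStep_quote_none,
            show r = r ++ ([] : List Char) by simp, pvScan_some_qf r hrqf]
          rfl
        have heq2neg : PySem.Chars.findFrom s ['"'] ((k : Int) + (pre.length : Int) + 1) none = -1 := by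
          rw [hcast1, hfind2, if_pos hfneg]
        show pvLoopA s (fuel + 1) (k : Int) kw res = _
        rw [pvLoopA]
        simp only [hsq']
        rw [if_neg hne1']
        simp only [heq2neg]
        rw [if_pos trivial, hC]
        simp
      | c2 :: t =>
        have hc2 : c2 = '"' := pvDW_cons r c2 t hrest2_def.symm
        subst hc2
        have hreq : r = pre2 ++ '"' :: t := hsplit2.symm
        have hfind2v : PySem.Chars.find (s.drop (k + pre.length + 1)) ['"'] = (pre2.length : Int) := by
          rw [hdropr, hreq]; exact pvFind_quote pre2 t hpre2qf
        have hlen_r : r.length = pre2.length + 1 + t.length := by rw [hreq]; simp; omega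
        have hklen2 : k + pre.length + 1 + pre2.length + 1 ≤ s.length := by omega
        have hdropt : s.drop (k + pre.length + 1 + pre2.length + 1) = t := by
          have h1 : s.drop (k + pre.length + 1 + pre2.length + 1) =
              (s.drop (k + pre.length + 1)).drop (pre2.length + 1) := by
            rw [List.drop_drop]; ring_nf
          rw [h1, hdropr, hreq, show pre2 ++ '"' :: t = (pre2 ++ ['"']) ++ t by simp,
            List.drop_left' (by simp)]
        have heq2' : PySem.Chars.findFrom s ['"'] ((k : Int) + (pre.length : Int) + 1) none =
            (k : Int) + (pre.length : Int) + 1 + (pre2.length : Int) := by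
          rw [hcast1, hfind2, hfind2v, if_neg (by omega)]
        have hne2' : ¬((k : Int) + (pre.length : Int) + 1 + (pre2.length : Int) = -1) := by omega
        have hslice : PySem.Chars.slice s (some ((k : Int) + (pre.length : Int) + 1))
            (some ((k : Int) + (pre.length : Int) + 1 + (pre2.length : Int))) = pre2 := by
          rw [PySem.Chars.slice_eq_listSlice, hcast1, PySem.List.slice_natCast_add, hdropr, hreq,
            List.take_left' rfl]
        have hC : pvContents m = pre2 :: pvContents t := by
          unfold pvContents
          rw [hmeq, pvScan_none_qf pre hpreqf, List.foldl_cons, pvScanStep_quote_none, hreq,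
            show pre2 ++ '"' :: t = pre2 ++ ('"' :: t) from rfl, pvScan_some_qf pre2 hpre2qf,
            List.foldl_cons, List.nil_append, pvScanStep_quote_some, List.nil_append,
            pvScan_acc t [pre2] none]
          rfl
        have hih := ih (k + pre.length + 1 + pre2.length + 1) (kw ++ pvKw pre2)
          (PySem.Chars.replace res pre2 []) hklen2 (by omega)
        rw [hdropt] at hih
        show pvLoopA s (fuel + 1) (k : Int) kw res = _
        rw [pvLoopA]
        simp only [hsq']
        rw [if_neg hne1']
        simp only [heq2']
        rw [if_neg hne2']
        simp only [hslice]
        rw [show (k : Int) + (pre.length : Int) + 1 + (pre2.length : Int) + 1 =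
            ((k + pre.length + 1 + pre2.length + 1 : Nat) : Int) by push_cast; ring]
        rw [show (kw ++ (PySem.Chars.splitOn pre2 [',']).map
            (fun keyword => String.ofList (PySem.Chars.strip keyword))) = kw ++ pvKw pre2 from rfl]
        rw [hih, hC]
        simp [pvKw]

-- ===== VERDICT (by name: the statement is the Claim_ definition above) =====
theorem extract_keywords_without_quotes_spec : Claim_equal_extract_keywords_without_quotes := by
  intro input_string _
  unfold Spec_extract_keywords_without_quotes
  have h := pvLoopA_eq input_string.toList (input_string.toList.length + 1) 0 [] input_string.toList
    (Nat.zero_le _) (by omega)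
  simp only [Nat.cast_zero] at h
  simp only [extract_keywords_without_quotes, extract_keywords_without_quotes_alt]
  rw [h]
  rfl
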